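-- pv_equiv track=rewrite | github.com/BoukalkoulSarra/Crypter_Decrypter | crypterDecrypter/views.py | reflect_cipher
-- ===== SOURCE A (Python) =====
-- def reflect_cipher(text):
--     result = ""
--     for char in text.upper():
--         if 'A' <= char <= 'M':
--             result += chr(ord('M') - (ord(char) - ord('A')))
--         elif 'N' <= char <= 'Z':
--             result += chr(ord('Z') - (ord(char) - ord('N')))
--         else:
--             result += char  # preserve non-letter characters
--     return result
-- ===== SOURCE B (Python) =====
-- def reflect_cipher(text):
--     first = "ABCDEFGHIJKLM"
--     second = "NOPQRSTUVWXYZ"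
--     table = str.maketrans(first + second, first[::-1] + second[::-1])
--     return text.upper().translate(table)
-- ===== Notes on version B (the rewrite author's own statement) =====
-- stated objective: idiomatic
-- what changed: Replaced the per-character if/elif comparison chain and string concatenation with a precomputed 26-entry str.maketrans translation table applied in one translate pass over text.upper().
import Mathlib
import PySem

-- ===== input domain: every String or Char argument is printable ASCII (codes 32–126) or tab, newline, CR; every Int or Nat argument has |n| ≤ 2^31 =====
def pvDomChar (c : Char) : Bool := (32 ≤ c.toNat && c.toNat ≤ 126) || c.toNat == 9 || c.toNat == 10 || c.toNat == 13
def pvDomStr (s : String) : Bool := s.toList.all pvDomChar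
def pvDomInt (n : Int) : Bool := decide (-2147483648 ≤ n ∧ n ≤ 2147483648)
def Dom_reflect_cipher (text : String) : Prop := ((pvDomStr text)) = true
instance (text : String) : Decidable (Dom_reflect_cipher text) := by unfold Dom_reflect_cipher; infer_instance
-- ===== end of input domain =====

-- B replaces A's per-character if/elif comparison branches by a precomputed 26-entry
-- translation table (str.maketrans) applied with translate over text.upper() (idiomatic).

-- ===== PORT A =====
-- literal port of A: fold over text.upper(), appending one character per step, branches in order
def reflect_cipher (text : String) : String :=
  (PySem.Str.upper text).toList.foldl (fun result char =>
    if 'A' ≤ char ∧ char ≤ 'M' then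
      result ++ String.singleton (Char.ofNat ('M'.toNat - (char.toNat - 'A'.toNat)))
    else if 'N' ≤ char ∧ char ≤ 'Z' then
      result ++ String.singleton (Char.ofNat ('Z'.toNat - (char.toNat - 'N'.toNat)))
    else
      result ++ String.singleton char) ""

-- ===== PORT B =====
-- literal port of Source B: table = maketrans(first+second, first[::-1]+second[::-1]) as a
-- PySem.Dict; translate = map the table lookup (unmapped characters pass through) over text.upper()
def reflect_cipher_alt (text : String) : String :=
  let first := "ABCDEFGHIJKLM".toList
  let second := "NOPQRSTUVWXYZ".toList
  let table : PySem.Dict Char Char :=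
    PySem.Dict.ofList ((first ++ second).zip (first.reverse ++ second.reverse))
  String.ofList ((PySem.Str.upper text).toList.map (fun c => table.getD c c))

-- ===== PRECONDITION & SPEC =====
def Spec_reflect_cipher (text : String) (out : String) : Prop := out = reflect_cipher_alt text
instance (text : String) (out : String) : Decidable (Spec_reflect_cipher text out) := by unfold Spec_reflect_cipher; infer_instance

-- ===== CLAIM (what is proved, stated in full; the proofs are below) =====
def Claim_equal_reflect_cipher : Prop := ∀ (text : String), Dom_reflect_cipher text → Spec_reflect_cipher text (reflect_cipher text)

-- ===== LEMMAS AND PROOFS =====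

-- A's per-character branch, factored out of the fold
def pvReflStep (char : Char) : Char :=
  if 'A' ≤ char ∧ char ≤ 'M' then Char.ofNat ('M'.toNat - (char.toNat - 'A'.toNat))
  else if 'N' ≤ char ∧ char ≤ 'Z' then Char.ofNat ('Z'.toNat - (char.toNat - 'N'.toNat))
  else char

-- B's translation table, as the same closed term the port builds
def pvTab : PySem.Dict Char Char :=
  PySem.Dict.ofList (("ABCDEFGHIJKLM".toList ++ "NOPQRSTUVWXYZ".toList).zip
    ("ABCDEFGHIJKLM".toList.reverse ++ "NOPQRSTUVWXYZ".toList.reverse))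

theorem pvMem_of_range {c : Char} (h1 : 65 ≤ c.toNat) (h2 : c.toNat ≤ 90) :
    c ∈ ['A','B','C','D','E','F','G','H','I','J','K','L','M','N','O','P','Q','R','S','T','U','V','W','X','Y','Z'] := by
  have hL : ['A','B','C','D','E','F','G','H','I','J','K','L','M','N','O','P','Q','R','S','T','U','V','W','X','Y','Z']
      = (List.range' 65 26).map Char.ofNat := by decide
  rw [hL, List.mem_map]
  exact ⟨c.toNat, by rw [List.mem_range'_1]; omega, Char.ofNat_toNat c⟩

-- the per-character equivalence: A's branch chain equals B's table lookup, for EVERY Char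
theorem pvTable_lookup (c : Char) : pvTab.getD c c = pvReflStep c := by
  by_cases hm : c ∈ ['A','B','C','D','E','F','G','H','I','J','K','L','M','N','O','P','Q','R','S','T','U','V','W','X','Y','Z']
  · simp only [List.mem_cons, List.not_mem_nil, or_false] at hm
    rcases hm with rfl|rfl|rfl|rfl|rfl|rfl|rfl|rfl|rfl|rfl|rfl|rfl|rfl|rfl|rfl|rfl|rfl|rfl|rfl|rfl|rfl|rfl|rfl|rfl|rfl|rfl <;> decide
  · have hc : ∀ h1 : 65 ≤ c.toNat, ∀ h2 : c.toNat ≤ 90, False := fun h1 h2 => hm (pvMem_of_range h1 h2)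
    have h1 : pvTab.contains c = false := by
      rw [PySem.Dict.contains_eq_decide_mem_keys]
      have hk : pvTab.keys = ['A','B','C','D','E','F','G','H','I','J','K','L','M','N','O','P','Q','R','S','T','U','V','W','X','Y','Z'] := by decide
      simp [hk]
      simpa [not_or] using hm
    rw [PySem.Dict.getD_of_not_contains (h := h1)]
    have hA : 'A'.val.toNat = 65 := by decide
    have hMv : 'M'.val.toNat = 77 := by decide
    have hNv : 'N'.val.toNat = 78 := by decide
    have hZv : 'Z'.val.toNat = 90 := by decide
    simp only [Char.toNat] at hc
    unfold pvReflStep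
    rw [if_neg, if_neg]
    · rintro ⟨ha, hb⟩
      rw [Char.le_def, UInt32.le_iff_toNat_le] at ha hb
      exact hc (by omega) (by omega)
    · rintro ⟨ha, hb⟩
      rw [Char.le_def, UInt32.le_iff_toNat_le] at ha hb
      exact hc (by omega) (by omega)

-- A's append-per-step fold is the map of its step function (on code-point lists)
theorem pvFoldl_toList (l : List Char) (s : String) :
    (l.foldl (fun r c => r ++ String.singleton (pvReflStep c)) s).toList
      = s.toList ++ l.map pvReflStep := by
  induction l generalizing s with
  | nil => simp
  | cons c t ih =>
      rw [List.foldl_cons, ih]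
      simp [String.singleton]

-- ===== VERDICT (by name: the statement is the Claim_ definition above) =====
theorem reflect_cipher_spec : Claim_equal_reflect_cipher := by
  intro text _
  unfold Spec_reflect_cipher reflect_cipher reflect_cipher_alt
  apply String.toList_inj.mp
  have hfun : (fun (result : String) (char : Char) =>
      if 'A' ≤ char ∧ char ≤ 'M' then
        result ++ String.singleton (Char.ofNat ('M'.toNat - (char.toNat - 'A'.toNat)))
      else if 'N' ≤ char ∧ char ≤ 'Z' then
        result ++ String.singleton (Char.ofNat ('Z'.toNat - (char.toNat - 'N'.toNat)))
      else result ++ String.singleton char)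
      = fun r c => r ++ String.singleton (pvReflStep c) := by
    funext r c
    simp only [pvReflStep]
    split_ifs <;> rfl
  rw [hfun, pvFoldl_toList]
  simp only [String.toList_empty, List.nil_append, String.toList_ofList]
  apply List.map_congr_left
  intro c _
  exact (pvTable_lookup c).symm
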